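-- pv_equiv track=rewrite | github.com/Tenjin25/VAPrecinctMap | scripts/fix_cd01_president_2024_totals.py | upsert_target_overrides
-- ===== SOURCE A (Python) =====
-- TARGET_SCOPE = "congressional"
--
-- TARGET_CONTEST = "president"
--
-- TARGET_YEAR = "2024"
--
-- TARGET_DEM_CANDIDATE = "Kamala D. Harris"
--
-- TARGET_REP_CANDIDATE = "Donald J. Trump"
--
-- TARGET_DISTRICT_FIXES: dict[str, dict[str, int | str]] = {
--     "1": {
--         "dem_votes": 227074,
--         "rep_votes": 250992,
--         "other_votes": 8529,
--         "notes": "User-supplied actual CD-01 presidential totals",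
--     },
--     "2": {
--         "dem_votes": 203182,
--         "rep_votes": 204265,
--         "other_votes": 6695,
--         "notes": "User-supplied actual CD-02 presidential totals",
--     },
-- }
--
-- def build_target_row(district: str, fix: dict[str, int | str]) -> dict[str, str]:
--     return {
--         "scope": TARGET_SCOPE,
--         "contest_type": TARGET_CONTEST,
--         "year": TARGET_YEAR,
--         "district": str(district),
--         "dem_votes": str(int(fix.get("dem_votes", 0) or 0)),
--         "rep_votes": str(int(fix.get("rep_votes", 0) or 0)),
--         "other_votes": str(int(fix.get("other_votes", 0) or 0)),
--         "dem_candidate": TARGET_DEM_CANDIDATE,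
--         "rep_candidate": TARGET_REP_CANDIDATE,
--         "notes": str(fix.get("notes", "") or ""),
--     }
--
-- def normalize_int_token(value: str) -> str:
--     s = (value or "").strip()
--     if not s:
--         return ""
--     try:
--         return str(int(float(s)))
--     except ValueError:
--         return s
--
-- def upsert_target_overrides(rows: list[dict[str, str]]) -> tuple[list[dict[str, str]], int, int]:
--     row_by_key: dict[tuple[str, str, str, str], dict[str, str]] = {}
--     for row in rows:
--         key = (
--             (row.get("scope") or "").lower(),
--             (row.get("contest_type") or "").lower(),
--             normalize_int_token(row.get("year", "")),
--             normalize_int_token(row.get("district", "")),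
--         )
--         row_by_key[key] = row
--
--     updated = 0
--     inserted = 0
--     for district, fix in TARGET_DISTRICT_FIXES.items():
--         target_row = build_target_row(district, fix)
--         target_key = (
--             target_row["scope"],
--             target_row["contest_type"],
--             target_row["year"],
--             target_row["district"],
--         )
--         existing = row_by_key.get(target_key)
--         if existing is not None:
--             existing.update(target_row)
--             updated += 1
--         else:
--             rows.append(target_row)
--             row_by_key[target_key] = target_row
--             inserted += 1
--     return rows, updated, inserted
-- ===== SOURCE B (Python) =====
-- TARGET_SCOPE = "congressional"
-- TARGET_CONTEST = "president"
-- TARGET_YEAR = "2024"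
-- TARGET_DEM_CANDIDATE = "Kamala D. Harris"
-- TARGET_REP_CANDIDATE = "Donald J. Trump"
--
-- TARGET_DISTRICT_FIXES = {
--     "1": {
--         "dem_votes": 227074,
--         "rep_votes": 250992,
--         "other_votes": 8529,
--         "notes": "User-supplied actual CD-01 presidential totals",
--     },
--     "2": {
--         "dem_votes": 203182,
--         "rep_votes": 204265,
--         "other_votes": 6695,
--         "notes": "User-supplied actual CD-02 presidential totals",
--     },
-- }
--
--
-- def _norm(value: str) -> str:
--     s = (value or "").strip()
--     if not s:
--         return ""
--     try:
--         return str(int(float(s)))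
--     except ValueError:
--         return s
--
--
-- def _key(row: dict) -> tuple:
--     return (
--         (row.get("scope") or "").lower(),
--         (row.get("contest_type") or "").lower(),
--         _norm(row.get("year", "")),
--         _norm(row.get("district", "")),
--     )
--
--
-- def upsert_target_overrides(rows):
--     # No index dict: for each fix, one linear scan remembering the LAST matching row.
--     updated = 0
--     inserted = 0
--     for district, fix in TARGET_DISTRICT_FIXES.items():
--         target_row = {
--             "scope": TARGET_SCOPE,
--             "contest_type": TARGET_CONTEST,
--             "year": TARGET_YEAR,
--             "district": str(district),
--             "dem_votes": str(int(fix.get("dem_votes", 0) or 0)),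
--             "rep_votes": str(int(fix.get("rep_votes", 0) or 0)),
--             "other_votes": str(int(fix.get("other_votes", 0) or 0)),
--             "dem_candidate": TARGET_DEM_CANDIDATE,
--             "rep_candidate": TARGET_REP_CANDIDATE,
--             "notes": str(fix.get("notes", "") or ""),
--         }
--         target_key = (TARGET_SCOPE, TARGET_CONTEST, TARGET_YEAR, str(district))
--         hit = None
--         for row in rows:
--             if _key(row) == target_key:
--                 hit = row
--         if hit is None:
--             rows.append(target_row)
--             inserted += 1
--         else:
--             hit.update(target_row)
--             updated += 1
--     return rows, updated, inserted
-- ===== Notes on version B (the rewrite author's own statement) =====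
-- stated objective: simpler
-- what changed: B drops A's precomputed key->row dict entirely: for each of the two fixed overrides it does one linear scan of rows remembering the last row whose normalized key matches, then updates it or appends.
-- outside the precondition, e.g. on upsert_target_overrides([{'year': 'inf'}]): A raises OverflowError, B raises OverflowError
import Mathlib
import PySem

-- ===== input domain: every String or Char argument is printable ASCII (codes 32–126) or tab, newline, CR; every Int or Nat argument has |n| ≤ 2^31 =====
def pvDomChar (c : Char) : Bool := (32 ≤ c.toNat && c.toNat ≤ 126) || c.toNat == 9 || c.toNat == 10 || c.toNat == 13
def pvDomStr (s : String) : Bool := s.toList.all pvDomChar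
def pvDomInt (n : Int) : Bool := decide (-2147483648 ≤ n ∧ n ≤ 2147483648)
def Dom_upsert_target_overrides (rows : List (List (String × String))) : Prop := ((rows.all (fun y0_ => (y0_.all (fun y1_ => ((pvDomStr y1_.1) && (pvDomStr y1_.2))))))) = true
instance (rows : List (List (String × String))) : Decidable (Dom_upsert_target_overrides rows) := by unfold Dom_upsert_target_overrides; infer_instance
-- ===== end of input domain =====

-- B drops A's precomputed key→row dict: each override does one linear scan that remembers
-- the LAST matching row (simpler; return-value equivalence — both Pythons mutate `rows` in place the same way).

-- ===== PORT A =====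
-- helpers shared by both Pythons (identical module-level helper code in Source A and Source B)

-- normalize_int_token: Python computes str(int(float(s))). On Pre_-admitted tokens (strips to
-- empty, an int literal with |n| ≤ 2^53, or a string float() rejects) this is EXACTLY
-- str(int(s)) resp. s, which is what this port computes; other tokens are excluded by Pre_.
def normalize_int_token (value : String) : String :=
  let s := PySem.Str.strip value
  if s.toList = [] then ""
  else
    match PySem.Int.ofStr? s with
    | some n => PySem.Int.toStr n
    | none => s

-- build_target_row: the heterogeneous fix dict {dem, rep, other : int; notes : str} is passed
-- as four arguments; the values are non-zero literals, so `fix.get(k, 0) or 0` is the value itself.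
def build_target_row (district : String) (dem rep other : Int) (notes : String) : List (String × String) :=
  [("scope", "congressional"), ("contest_type", "president"), ("year", "2024"),
   ("district", district),
   ("dem_votes", PySem.Int.toStr dem), ("rep_votes", PySem.Int.toStr rep),
   ("other_votes", PySem.Int.toStr other),
   ("dem_candidate", "Kamala D. Harris"), ("rep_candidate", "Donald J. Trump"),
   ("notes", notes)]

-- TARGET_DISTRICT_FIXES.items(), flattened to (district, dem, rep, other, notes)
def pvFixes : List (String × Int × Int × Int × String) :=
  [("1", 227074, 250992, 8529, "User-supplied actual CD-01 presidential totals"),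
   ("2", 203182, 204265, 6695, "User-supplied actual CD-02 presidential totals")]

-- Python's row_by_key stores ROW REFERENCES; a reference into the current `rows` list is
-- modeled as the row's index, and `existing.update(...)` as List.set at that index.
def upsert_target_overrides (rows : List (List (String × String))) : (List (List (String × String))) × Int × Int :=
  let row_by_key : PySem.Dict (String × String × String × String) Nat :=
    (rows.zipIdx).foldl
      (fun d ri =>
        d.insert
          (PySem.Str.lower (PySem.Dict.getD ⟨ri.1⟩ "scope" ""),
           PySem.Str.lower (PySem.Dict.getD ⟨ri.1⟩ "contest_type" ""),
           normalize_int_token (PySem.Dict.getD ⟨ri.1⟩ "year" ""),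
           normalize_int_token (PySem.Dict.getD ⟨ri.1⟩ "district" "")) ri.2)
      (PySem.Dict.mk [])
  let st :=
    pvFixes.foldl
      (fun (st : (List (List (String × String))) × PySem.Dict (String × String × String × String) Nat × Int × Int) fx =>
        let (rows, rbk, upd, ins) := st
        let t := build_target_row fx.1 fx.2.1 fx.2.2.1 fx.2.2.2.1 fx.2.2.2.2
        -- target_row["scope"] etc.: the keys are present in t by construction, so getD is exact
        let tk := (PySem.Dict.getD ⟨t⟩ "scope" "", PySem.Dict.getD ⟨t⟩ "contest_type" "",
                   PySem.Dict.getD ⟨t⟩ "year" "", PySem.Dict.getD ⟨t⟩ "district" "")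
        match rbk.get? tk with
        | some i => (rows.set i (PySem.Dict.update ⟨rows.getD i []⟩ t).items, rbk, upd + 1, ins)
        | none => (rows ++ [t], rbk.insert tk rows.length, upd, ins + 1))
      (rows, row_by_key, 0, 0)
  (st.1, st.2.2.1, st.2.2.2)

-- ===== PORT B =====
-- Source B's _key(row)
def pvKey (row : List (String × String)) : String × String × String × String :=
  (PySem.Str.lower (PySem.Dict.getD ⟨row⟩ "scope" ""),
   PySem.Str.lower (PySem.Dict.getD ⟨row⟩ "contest_type" ""),
   normalize_int_token (PySem.Dict.getD ⟨row⟩ "year" ""),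
   normalize_int_token (PySem.Dict.getD ⟨row⟩ "district" ""))

-- Source B's `hit` is the last matching ROW REFERENCE; modeled as the row's index in `rows`
def upsert_target_overrides_alt (rows : List (List (String × String))) : (List (List (String × String))) × Int × Int :=
  pvFixes.foldl
    (fun (st : (List (List (String × String))) × Int × Int) fx =>
      let (rows, upd, ins) := st
      let t := build_target_row fx.1 fx.2.1 fx.2.2.1 fx.2.2.2.1 fx.2.2.2.2
      let tk := ("congressional", "president", "2024", fx.1)
      let hit := (rows.zipIdx).foldl
        (fun (acc : Option Nat) ri => if pvKey ri.1 == tk then some ri.2 else acc) none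
      match hit with
      | none => (rows ++ [t], upd, ins + 1)
      | some i => (rows.set i (PySem.Dict.update ⟨rows.getD i []⟩ t).items, upd + 1, ins))
    (rows, 0, 0)

-- ===== PRECONDITION & SPEC =====
-- float-literal shape check used only by Pre_ (Python float() acceptance, minus nan, on ASCII)
def pvEatRun : List Char → List Char
  | '_' :: c :: r => if c.isDigit then pvEatRun r else '_' :: c :: r
  | c :: r => if c.isDigit then pvEatRun r else c :: r
  | [] => []

def pvDigitpart? : List Char → Option (List Char)
  | c :: r => if c.isDigit then some (pvEatRun r) else none
  | [] => none

def pvFloatLit (cs0 : List Char) : Bool :=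
  let cs := match cs0 with | '+' :: r => r | '-' :: r => r | l => l
  if PySem.Chars.lower cs = "inf".toList || PySem.Chars.lower cs = "infinity".toList then true
  else
    let p1 : Bool × List Char := match pvDigitpart? cs with | some r => (true, r) | none => (false, cs)
    let p2 : Bool × List Char :=
      match p1.2 with
      | '.' :: r => (match pvDigitpart? r with | some r' => (true, r') | none => (p1.1, r))
      | l => (p1.1, l)
    if p2.1 = false then false
    else
      match p2.2 with
      | 'e' :: r =>
          (match pvDigitpart? (match r with | '+' :: q => q | '-' :: q => q | l => l) with
           | some [] => true | _ => false)
      | 'E' :: r =>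
          (match pvDigitpart? (match r with | '+' :: q => q | '-' :: q => q | l => l) with
           | some [] => true | _ => false)
      | [] => true
      | _ => false

def pvTokenOK (v : String) : Bool :=
  let s := PySem.Str.strip v
  if s.toList = [] then true
  else
    match PySem.Int.ofStr? s with
    | some n => decide (-(2 ^ 53) ≤ n ∧ n ≤ 2 ^ 53)
    | none => !(pvFloatLit s.toList)

-- Pre_ excludes rows whose "year"/"district" token strips to a non-integer float literal
-- (including inf, where A raises OverflowError) or to an int literal beyond 2^53: there
-- normalize_int_token goes through float()'s rounding, which the ports do not model;
-- both Pythons (A and B share the helper) behave identically on every such input.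
def Pre_upsert_target_overrides (rows : List (List (String × String))) : Prop :=
  (rows.all (fun row =>
    pvTokenOK (PySem.Dict.getD ⟨row⟩ "year" "") && pvTokenOK (PySem.Dict.getD ⟨row⟩ "district" ""))) = true

instance (rows : List (List (String × String))) : Decidable (Pre_upsert_target_overrides rows) := by
  unfold Pre_upsert_target_overrides; infer_instance

def pvWitness_upsert_target_overrides : List (List (String × String)) :=
  [[("scope", "CONGRESSIONAL"), ("contest_type", "President"), ("year", " 2024 "), ("district", "01")]]

def Spec_upsert_target_overrides (rows : List (List (String × String))) (out : (List (List (String × String))) × Int × Int) : Prop := out = upsert_target_overrides_alt rows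
instance (rows : List (List (String × String))) (out : (List (List (String × String))) × Int × Int) : Decidable (Spec_upsert_target_overrides rows out) := by unfold Spec_upsert_target_overrides; infer_instance

-- ===== CLAIM (what is proved, stated in full; the proofs are below) =====
def Claim_equal_upsert_target_overrides : Prop := ∀ (rows : List (List (String × String))), Dom_upsert_target_overrides rows → Pre_upsert_target_overrides rows → Spec_upsert_target_overrides rows (upsert_target_overrides rows)

-- ===== LEMMAS AND PROOFS =====

-- a dict built by inserting (f a ↦ g a) left to right looks up to the LAST matching element
theorem pv_get?_foldl_insert {κ α ν : Type} [BEq κ] [LawfulBEq κ] (f : α → κ) (g : α → ν)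
    (l : List α) (d : PySem.Dict κ ν) (k : κ) :
    (l.foldl (fun d a => d.insert (f a) (g a)) d).get? k
      = l.foldl (fun acc a => if f a == k then some (g a) else acc) (d.get? k) := by
  induction l generalizing d with
  | nil => rfl
  | cons a l ih =>
      simp only [List.foldl_cons, ih]
      by_cases h : f a = k
      · subst h; rw [PySem.Dict.get?_insert_self]; simp
      · rw [PySem.Dict.get?_insert_of_ne _ _ (fun he => h he.symm)]
        simp [beq_iff_eq, h]

-- B's scan for the last row whose key is k (Source B's inner loop, as a function of k)
def pvLastHit (rows : List (List (String × String))) (k : String × String × String × String) : Option Nat :=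
  (rows.zipIdx).foldl (fun (acc : Option Nat) ri => if pvKey ri.1 == k then some ri.2 else acc) none

theorem pvLastHit_append (rows : List (List (String × String))) (t) (k) :
    pvLastHit (rows ++ [t]) k
      = if pvKey t == k then some rows.length else pvLastHit rows k := by
  simp [pvLastHit, List.zipIdx_append, List.foldl_append]

theorem pvLastHit_aux_mem (l : List (List (String × String))) (k) :
    ∀ (n : Nat) (acc : Option Nat) (i : Nat),
      (l.zipIdx n).foldl (fun (acc : Option Nat) ri => if pvKey ri.1 == k then some ri.2 else acc) acc = some i →
      acc = some i ∨ ∃ j, j < l.length ∧ i = n + j ∧ pvKey (l.getD j []) = k := by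
  induction l with
  | nil => intro n acc i h; exact Or.inl h
  | cons a l ih =>
      intro n acc i h
      simp only [List.zipIdx_cons, List.foldl_cons] at h
      rcases ih (n + 1) _ i h with h' | ⟨j, hj, hi, hk⟩
      · by_cases hk : pvKey a = k
        · simp only [hk, BEq.rfl, if_true, Option.some.injEq] at h'
          exact Or.inr ⟨0, by simp, by omega, by simpa using hk⟩
        · simp only [beq_iff_eq, hk, if_false] at h'
          exact Or.inl h'
      · exact Or.inr ⟨j + 1, by simpa using hj, by omega, by simpa using hk⟩

theorem pvLastHit_mem (rows : List (List (String × String))) (k) (i : Nat)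
    (h : pvLastHit rows k = some i) : i < rows.length ∧ pvKey (rows.getD i []) = k := by
  rcases pvLastHit_aux_mem rows k 0 none i h with h' | ⟨j, hj, hi, hk⟩
  · cases h'
  · subst hi; exact ⟨by simpa using hj, by simpa using hk⟩

theorem pvLastHit_set (rows : List (List (String × String))) (i : Nat) (r' : List (String × String))
    (k₀ k : String × String × String × String)
    (hlt : i < rows.length) (hr : pvKey r' = k₀) (hi : pvKey (rows.getD i []) = k₀) (hne : k₀ ≠ k) :
    pvLastHit (rows.set i r') k = pvLastHit rows k := by
  have aux : ∀ (l : List (List (String × String))) (n : Nat) (acc : Option Nat) (i : Nat),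
      i < l.length → pvKey (l.getD i []) = k₀ →
      (((l.set i r').zipIdx n).foldl (fun (acc : Option Nat) ri => if pvKey ri.1 == k then some ri.2 else acc) acc)
        = ((l.zipIdx n).foldl (fun (acc : Option Nat) ri => if pvKey ri.1 == k then some ri.2 else acc) acc) := by
    intro l
    induction l with
    | nil => intro n acc i hlt; simp at hlt
    | cons a l ih =>
        intro n acc i hlt hkey
        cases i with
        | zero =>
            simp only [List.getD_cons_zero] at hkey
            simp only [List.set_cons_zero, List.zipIdx_cons, List.foldl_cons]
            have h1 : (pvKey r' == k) = false := by simp [hr, hne]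
            have h2 : (pvKey a == k) = false := by simp [hkey, hne]
            rw [h1, h2]
        | succ i =>
            simp only [List.getD_cons_succ] at hkey
            simp only [List.set_cons_succ, List.zipIdx_cons, List.foldl_cons]
            exact ih (n + 1) _ i (by simpa using hlt) hkey
  exact aux rows 0 none i hlt hi
-- the two lambdas written inline in the ports, named for rewriting (definitional)
theorem pvKey_eta :
    (fun (d : PySem.Dict (String × String × String × String) Nat) (ri : List (String × String) × Nat) =>
        d.insert
          (PySem.Str.lower (PySem.Dict.getD ⟨ri.1⟩ "scope" ""),
           PySem.Str.lower (PySem.Dict.getD ⟨ri.1⟩ "contest_type" ""),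
           normalize_int_token (PySem.Dict.getD ⟨ri.1⟩ "year" ""),
           normalize_int_token (PySem.Dict.getD ⟨ri.1⟩ "district" "")) ri.2)
      = (fun d ri => d.insert (pvKey ri.1) ri.2) := rfl

theorem pvLastHit_eta (rows : List (List (String × String))) (k : String × String × String × String) :
    (rows.zipIdx).foldl (fun (acc : Option Nat) ri => if pvKey ri.1 == k then some ri.2 else acc) none
      = pvLastHit rows k := rfl

theorem pv_dict_eta {κ ν : Type} (d : PySem.Dict κ ν) : PySem.Dict.mk d.items = d := rfl

theorem pv_getD_update (r l : List (String × String)) (k : String) (v : String) :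
    (PySem.Dict.update (⟨r⟩ : PySem.Dict String String) l).getD k v
      = (l.foldl (fun acc p => if p.1 == k then some p.2 else acc)
          ((⟨r⟩ : PySem.Dict String String).get? k)).getD v := by
  unfold PySem.Dict.getD
  rw [show PySem.Dict.update (⟨r⟩ : PySem.Dict String String) l
        = l.foldl (fun d p => d.insert p.1 p.2) ⟨r⟩ from rfl]
  rw [pv_get?_foldl_insert Prod.fst Prod.snd]

theorem pv_key_update (r : List (String × String)) (d : String) (dem rep oth : Int) (nt : String) :
    pvKey ((PySem.Dict.update (⟨r⟩ : PySem.Dict String String) (build_target_row d dem rep oth nt)).items)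
      = ("congressional", "president", "2024", normalize_int_token d) := by
  unfold pvKey
  simp [pv_dict_eta, pv_getD_update, build_target_row]
  decide

theorem pv_core (rows : List (List (String × String))) :
    upsert_target_overrides rows = upsert_target_overrides_alt rows := by
  have hd0 : ∀ k, ((rows.zipIdx).foldl (fun d ri => d.insert (pvKey ri.1) ri.2)
      (PySem.Dict.mk ([] : List ((String × String × String × String) × Nat)))).get? k = pvLastHit rows k := by
    intro k
    rw [pv_get?_foldl_insert (fun ri : List (String × String) × Nat => pvKey ri.1) Prod.snd]
    rfl
  have htk : ∀ (d : String) (dem rep oth : Int) (nt : String),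
      (((⟨build_target_row d dem rep oth nt⟩ : PySem.Dict String String).getD "scope" ""),
       ((⟨build_target_row d dem rep oth nt⟩ : PySem.Dict String String).getD "contest_type" ""),
       ((⟨build_target_row d dem rep oth nt⟩ : PySem.Dict String String).getD "year" ""),
       ((⟨build_target_row d dem rep oth nt⟩ : PySem.Dict String String).getD "district" ""))
        = ("congressional", "president", "2024", d) := fun _ _ _ _ _ => rfl
  have hk1 : pvKey (build_target_row "1" 227074 250992 8529 "User-supplied actual CD-01 presidential totals")
      = ("congressional", "president", "2024", "1") := by decide
  have hne : ("congressional", "president", "2024", "2") ≠ (("congressional", "president", "2024", "1") : String × String × String × String) := by decide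
  unfold upsert_target_overrides upsert_target_overrides_alt
  simp only [pvFixes, List.foldl_cons, List.foldl_nil, pvKey_eta, pvLastHit_eta, htk]
  cases h1 : pvLastHit rows ("congressional", "president", "2024", "1") with
  | none =>
      simp only [hd0, h1, PySem.Dict.get?_insert_of_ne _ _ hne, pvLastHit_append, hk1,
        show ((("congressional", "president", "2024", "1") : String × String × String × String)
              == ("congressional", "president", "2024", "2")) = false from by decide,
        if_false, Bool.false_eq_true]
      cases h2 : pvLastHit rows ("congressional", "president", "2024", "2") with
      | none => rfl
      | some j => rfl
  | some i =>
      obtain ⟨hlt, hkey⟩ := pvLastHit_mem rows _ i h1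
      have hkeq : pvKey ((PySem.Dict.update (⟨rows.getD i []⟩ : PySem.Dict String String)
          (build_target_row "1" 227074 250992 8529 "User-supplied actual CD-01 presidential totals")).items)
          = ("congressional", "president", "2024", "1") := by rw [pv_key_update]; decide
      have hset := pvLastHit_set rows i _ _ ("congressional", "president", "2024", "2") hlt hkeq hkey (by decide)
      simp only [hd0, h1, hset]
      cases h2 : pvLastHit rows ("congressional", "president", "2024", "2") with
      | none => rfl
      | some j => rfl

theorem upsert_target_overrides_spec : Claim_equal_upsert_target_overrides := by
  intro rows _ _
  exact (pv_core rows).symm ▸ rfl
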